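-- pv_equiv track=rewrite | github.com/linhdvu14/cp-sols | sols/CodeForces/1800_d3/E1_Unforgivable_Curse_easy_version_.py | solve
-- ===== SOURCE A (Python) =====
-- def solve(N, K, A, B):
--     cnt = [0] * 26
--     for i, (a, b) in enumerate(zip(A, B)):
--         cnt[ord(a) - ord('a')] += 1
--         cnt[ord(b) - ord('a')] -= 1
--         if i < K and i > N - K - 1 and a != b: return 'NO'
--
--     if all(not c for c in cnt): return 'YES'
--     return 'NO'
-- ===== SOURCE B (Python) =====
-- def solve(N, K, A, B):
--     m = min(len(A), len(B))
--     if sorted(A[:m]) != sorted(B[:m]):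
--         return 'NO'
--     for i in range(max(0, N - K), min(m, K)):
--         if A[i] != B[i]:
--             return 'NO'
--     return 'YES'
-- ===== Notes on version B (the rewrite author's own statement) =====
-- stated objective: alternative
-- what changed: A fuses counting and the locked-position check into one enumerate(zip) pass over a 26-slot difference array; B instead compares sorted prefixes for multiset equality and scans only the analytically derived locked block range(max(0,N-K), min(m,K)). Pre_ requires the zipped prefixes of A and B to stay within character codes 71..122 ('G'..'z'): outside that range A's cnt indexing raises IndexError, except on inputs where an earlier locked-position mismatch already returned 'NO' (excluded although both programs return 'NO' there).
-- intended difference: On inputs whose zipped prefixes have no locked-position mismatch and are not anagrams but collide modulo A's negative-index wraparound (codes 71..96 alias codes 97..122, e.g. '`' counts as 'z'), A returns 'YES' although the strings cannot be transformed into each other; B returns 'NO', the intended answer. — e.g. on solve(1, 0, "`", "z"): A returns "YES", B returns "NO"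
-- outside the precondition, e.g. on solve(2, 2, 'a ', 'b '): A returns 'NO', B returns 'NO'
import Mathlib
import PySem

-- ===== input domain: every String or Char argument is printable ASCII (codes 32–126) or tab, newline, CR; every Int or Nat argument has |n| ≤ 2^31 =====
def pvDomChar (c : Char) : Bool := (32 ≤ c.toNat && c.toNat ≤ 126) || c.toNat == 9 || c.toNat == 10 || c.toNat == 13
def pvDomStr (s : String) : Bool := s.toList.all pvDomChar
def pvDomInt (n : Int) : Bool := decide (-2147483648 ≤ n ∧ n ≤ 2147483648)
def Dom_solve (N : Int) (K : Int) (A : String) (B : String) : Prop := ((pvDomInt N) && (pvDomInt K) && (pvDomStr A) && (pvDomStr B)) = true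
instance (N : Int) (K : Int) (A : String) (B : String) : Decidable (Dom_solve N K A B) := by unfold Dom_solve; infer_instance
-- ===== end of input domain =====

-- B replaces A's fused counting/locked-check pass by a sorted-prefix multiset test plus a scan
-- of the analytically derived locked block range(max(0,N-K), min(m,K)); same answers on Pre_
-- outside the stated wraparound region D_.

-- ===== PORT A =====
-- cnt[idx] += d with Python's (possibly negative, wrapping) list indexing; under Pre_ the index
-- lies in -26..25, where pyGetD/pySetD are exact (the IndexError inputs are excluded by Pre_).
def pvAddAt (cnt : List Int) (idx : Int) (d : Int) : List Int :=
  PySem.List.pySetD cnt idx (PySem.List.pyGetD cnt idx 0 + d)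

def solveLoop (N K : Int) : List (Char × Char) → Int → List Int → Option (List Int)
  | [], _, cnt => some cnt
  | (a, b) :: rest, i, cnt =>
      let cnt2 := pvAddAt (pvAddAt cnt ((a.toNat : Int) - 97) 1) ((b.toNat : Int) - 97) (-1)
      if i < K ∧ N - K - 1 < i ∧ a ≠ b then none
      else solveLoop N K rest (i + 1) cnt2

def solve (N : Int) (K : Int) (A : String) (B : String) : String :=
  match solveLoop N K (A.toList.zip B.toList) 0 (List.replicate 26 0) with
  | none => "NO"
  | some cnt => if cnt.all (fun c => c == 0) then "YES" else "NO"

-- ===== PORT B =====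
-- the for-loop of Source B; the `| _, _ =>` arm is unreachable (every index of the range is in bounds)
def solveAltScan (la lb : List Char) : List Int → String
  | [] => "YES"
  | i :: rest =>
      match PySem.List.pyGet? la i, PySem.List.pyGet? lb i with
      | some a, some b => if a ≠ b then "NO" else solveAltScan la lb rest
      | _, _ => "NO"

def solve_alt (N : Int) (K : Int) (A : String) (B : String) : String :=
  let la := A.toList
  let lb := B.toList
  let m : Int := ((min la.length lb.length : Nat) : Int)
  if PySem.List.sorted (PySem.List.slice la none (some m)) (fun x => x) false ≠
     PySem.List.sorted (PySem.List.slice lb none (some m)) (fun x => x) false then "NO"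
  else solveAltScan la lb (PySem.List.pyRange (max 0 (N - K)) (min m K) 1)

-- ===== PRECONDITION & SPEC =====
-- Pre_ requires the zipped prefixes of A and B (the characters A's loop touches) to stay within
-- character codes 71..122 ('G'..'z'): outside that range A's cnt indexing raises IndexError,
-- except on inputs where an earlier locked-position mismatch already returned 'NO' (excluded
-- although both programs return 'NO' there).
def Pre_solve (N : Int) (K : Int) (A : String) (B : String) : Prop :=
  ((A.toList.take (min A.toList.length B.toList.length) ++
    B.toList.take (min A.toList.length B.toList.length)).all
      fun c => 71 ≤ c.toNat && c.toNat ≤ 122) = true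
instance (N : Int) (K : Int) (A : String) (B : String) : Decidable (Pre_solve N K A B) := by
  unfold Pre_solve; infer_instance
def pvWitness_solve : Int × Int × String × String := (3, 2, "abc", "bca")

-- the slot of cnt that Python's (wrapping) index ord(c)-97 actually touches, for codes 71..122
def pvSlot (c : Char) : Nat := (c.toNat - 71) % 26

-- On inputs whose zipped prefixes have no locked-position mismatch and are not anagrams but
-- collide modulo A's negative-index wraparound (codes 71..96 alias codes 97..122, e.g. '`'
-- counts as 'z'), A returns 'YES' although the strings cannot be transformed into each other;
-- B returns 'NO', the intended answer.
def D_solve (N : Int) (K : Int) (A : String) (B : String) : Prop :=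
  let m := min A.toList.length B.toList.length
  let a := A.toList.take m
  let b := B.toList.take m
  (a.take K.toNat).drop (N - K).toNat = (b.take K.toNat).drop (N - K).toNat ∧
  (a.map pvSlot).Perm (b.map pvSlot) ∧ ¬ a.Perm b
instance (N : Int) (K : Int) (A : String) (B : String) : Decidable (D_solve N K A B) := by
  unfold D_solve; infer_instance

def Spec_solve (N : Int) (K : Int) (A : String) (B : String) (out : String) : Prop :=
  ¬ D_solve N K A B → out = solve_alt N K A B
instance (N : Int) (K : Int) (A : String) (B : String) (out : String) : Decidable (Spec_solve N K A B out) := by unfold Spec_solve; infer_instance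

def pvDiffWitness_solve : Int × Int × String × String := (1, 0, "`", "z")
def pvDiffWitnessOut_solve : String × String := ("YES", "NO")

-- ===== CLAIM (what is proved, stated in full; the proofs are below) =====
def Claim_unchanged_solve : Prop := ∀ (N : Int) (K : Int) (A : String) (B : String), Dom_solve N K A B → Pre_solve N K A B → Spec_solve N K A B (solve N K A B)
def Claim_changed_solve : Prop := Dom_solve (pvDiffWitness_solve.1) (pvDiffWitness_solve.2.1) (pvDiffWitness_solve.2.2.1) (pvDiffWitness_solve.2.2.2) ∧ Pre_solve (pvDiffWitness_solve.1) (pvDiffWitness_solve.2.1) (pvDiffWitness_solve.2.2.1) (pvDiffWitness_solve.2.2.2) ∧ D_solve (pvDiffWitness_solve.1) (pvDiffWitness_solve.2.1) (pvDiffWitness_solve.2.2.1) (pvDiffWitness_solve.2.2.2) ∧ solve (pvDiffWitness_solve.1) (pvDiffWitness_solve.2.1) (pvDiffWitness_solve.2.2.1) (pvDiffWitness_solve.2.2.2) = pvDiffWitnessOut_solve.1 ∧ solve_alt (pvDiffWitness_solve.1) (pvDiffWitness_solve.2.1) (pvDiffWitness_solve.2.2.1) (pvDiffWitness_solve.2.2.2)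 = pvDiffWitnessOut_solve.2 ∧ pvDiffWitnessOut_solve.1 ≠ pvDiffWitnessOut_solve.2
def Claim_exact_solve : Prop := ∀ (N : Int) (K : Int) (A : String) (B : String), Dom_solve N K A B → Pre_solve N K A B → D_solve N K A B → solve N K A B ≠ solve_alt N K A B

-- ===== LEMMAS AND PROOFS =====

-- the accumulation step of A's loop, without the early return
def pvStep (cnt : List Int) (p : Char × Char) : List Int :=
  pvAddAt (pvAddAt cnt ((p.1.toNat : Int) - 97) 1) ((p.2.toNat : Int) - 97) (-1)

def pvOk (c : Char) : Prop := 71 ≤ c.toNat ∧ c.toNat ≤ 122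

theorem pvOk_of_all (s : List Char)
    (h : (s.all fun c => 71 ≤ c.toNat && c.toNat ≤ 122) = true) : ∀ c ∈ s, pvOk c := by
  intro c hc
  have := List.all_eq_true.mp h c hc
  simp only [Bool.and_eq_true, decide_eq_true_eq] at this
  exact this

theorem pvSlot_lt (c : Char) : pvSlot c < 26 := Nat.mod_lt _ (by omega)

theorem pvIdx_slot (c : Char) (hc : pvOk c) :
    PySem.List.pyIdx? 26 ((c.toNat : Int) - 97) = some (pvSlot c) := by
  obtain ⟨h1, h2⟩ := hc
  unfold PySem.List.pyIdx? pvSlot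
  split_ifs with ha hb hd
  · rw [Option.some_inj]; omega
  · omega
  · rw [Option.some_inj]; omega
  · omega

theorem pvAddAt_length (cnt : List Int) (i d : Int) : (pvAddAt cnt i d).length = cnt.length := by
  simp [pvAddAt, PySem.List.length_pySetD]

theorem pvAddAt_pyGetD (cnt : List Int) (hlen : cnt.length = 26) (c : Char) (hc : pvOk c)
    (d : Int) (j : Nat) (hj : j < 26) :
    PySem.List.pyGetD (pvAddAt cnt ((c.toNat : Int) - 97) d) (j : Int) 0 =
      if pvSlot c = j then PySem.List.pyGetD cnt (j : Int) 0 + d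
      else PySem.List.pyGetD cnt (j : Int) 0 := by
  have hidx : PySem.List.pyIdx? cnt.length ((c.toNat : Int) - 97) = some (pvSlot c) := by
    rw [hlen]; exact pvIdx_slot c hc
  have hslot : pvSlot c < cnt.length := by rw [hlen]; exact pvSlot_lt c
  have hget0 : PySem.List.pyGetD cnt ((c.toNat : Int) - 97) 0 = cnt[pvSlot c]'hslot := by
    rw [PySem.List.pyGetD, PySem.List.pyGet?, hidx]
    simp [List.getElem?_eq_getElem hslot]
  have hset : pvAddAt cnt ((c.toNat : Int) - 97) d = cnt.set (pvSlot c) (cnt[pvSlot c]'hslot + d) := by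
    rw [pvAddAt, hget0, PySem.List.pySetD, PySem.List.pySet?, hidx]
    rfl
  rw [hset,
      PySem.List.pyGetD_eq_getElem _ _ (by omega) (by simp [hlen]; exact_mod_cast hj),
      PySem.List.pyGetD_eq_getElem _ _ (by omega) (by rw [hlen]; exact_mod_cast hj)]
  rw [List.getElem_set]
  simp only [Int.toNat_natCast]
  split_ifs with h1
  · simp only [h1]
  · rfl

-- A's loop returns none exactly when some locked position carries a mismatch
theorem solveLoop_none_iff (N K : Int) (zs : List (Char × Char)) (i : Int) (cnt : List Int) :
    solveLoop N K zs i cnt = none ↔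
      ∃ j : Nat, ∃ h : j < zs.length,
        i + j < K ∧ N - K - 1 < i + j ∧ zs[j].1 ≠ zs[j].2 := by
  induction zs generalizing i cnt with
  | nil => simp [solveLoop]
  | cons p rest ih =>
    obtain ⟨a, b⟩ := p
    rw [solveLoop]
    split_ifs with h
    · exact iff_of_true rfl
        ⟨0, by simp, by simpa using h.1, by simpa using h.2.1, by simpa using h.2.2⟩
    · rw [ih]
      constructor
      · rintro ⟨j, hj, h1, h2, h3⟩
        refine ⟨j + 1, by simpa using hj, by push_cast at h1 ⊢; omega, by push_cast at h2 ⊢; omega, ?_⟩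
        simpa using h3
      · rintro ⟨j, hj, h1, h2, h3⟩
        match j with
        | 0 => exact absurd ⟨by simpa using h1, by simpa using h2, by simpa using h3⟩ h
        | j + 1 =>
          refine ⟨j, by simpa using hj, by push_cast at h1 ⊢; omega, by push_cast at h2 ⊢; omega, ?_⟩
          simpa using h3

-- when A's loop returns a value, it is the plain fold of pvStep
theorem solveLoop_some (N K : Int) (zs : List (Char × Char)) (i : Int) (cnt : List Int) :
    solveLoop N K zs i cnt = none ∨ solveLoop N K zs i cnt = some (zs.foldl pvStep cnt) := by
  induction zs generalizing i cnt with
  | nil => right; rfl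
  | cons p rest ih =>
    obtain ⟨a, b⟩ := p
    rw [solveLoop]
    split_ifs with h
    · left; rfl
    · exact ih (i + 1) _

theorem length_foldl_pvStep (zs : List (Char × Char)) (cnt : List Int) :
    (zs.foldl pvStep cnt).length = cnt.length := by
  induction zs generalizing cnt with
  | nil => rfl
  | cons p rest ih => rw [List.foldl_cons, ih, pvStep, pvAddAt_length, pvAddAt_length]

-- each slot of the fold is the signed count of characters hashing to it
theorem foldl_pvStep_pyGetD (zs : List (Char × Char)) (j : Nat) (hj : j < 26) (cnt : List Int)
    (hlen : cnt.length = 26) (hlow : ∀ p ∈ zs, pvOk p.1 ∧ pvOk p.2) :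
    PySem.List.pyGetD (zs.foldl pvStep cnt) (j : Int) 0 =
      PySem.List.pyGetD cnt (j : Int) 0
        + (zs.countP (fun p => pvSlot p.1 == j) : Int)
        - (zs.countP (fun p => pvSlot p.2 == j) : Int) := by
  induction zs generalizing cnt with
  | nil => simp
  | cons p rest ih =>
    obtain ⟨a, b⟩ := p
    have ha := (hlow (a, b) (by simp)).1
    have hb := (hlow (a, b) (by simp)).2
    rw [List.foldl_cons,
        ih (pvStep cnt (a, b)) (by rw [pvStep, pvAddAt_length, pvAddAt_length, hlen])
          (fun q hq => hlow q (by simp [hq])),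
        List.countP_cons, List.countP_cons]
    have hstep : PySem.List.pyGetD (pvStep cnt (a, b)) (j : Int) 0 =
        (if pvSlot a = j then PySem.List.pyGetD cnt (j : Int) 0 + 1
         else PySem.List.pyGetD cnt (j : Int) 0) + (if pvSlot b = j then -1 else 0) := by
      rw [pvStep, pvAddAt_pyGetD _ (by rw [pvAddAt_length, hlen]) _ hb _ _ hj,
          pvAddAt_pyGetD _ hlen _ ha _ _ hj]
      split_ifs <;> ring
    rw [hstep]
    simp only [beq_iff_eq]
    split_ifs <;> push_cast <;> ring

-- the scan of B returns "YES" iff every index of the list matches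
theorem solveAltScan_yes_iff (la lb : List Char) (is : List Int) :
    solveAltScan la lb is = "YES" ↔
      ∀ i ∈ is, ∃ a b, PySem.List.pyGet? la i = some a ∧ PySem.List.pyGet? lb i = some b ∧ a = b := by
  induction is with
  | nil => simp [solveAltScan]
  | cons i rest ih =>
    rcases hA : PySem.List.pyGet? la i with _ | a <;>
      rcases hB : PySem.List.pyGet? lb i with _ | b <;>
      rw [solveAltScan, hA, hB]
    · show ("NO" : String) = "YES" ↔ _
      refine iff_of_false (by decide) (fun h => ?_)
      obtain ⟨a', b', ha', _, _⟩ := h i (List.mem_cons_self ..)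
      rw [hA] at ha'; exact absurd ha' (by simp)
    · show ("NO" : String) = "YES" ↔ _
      refine iff_of_false (by decide) (fun h => ?_)
      obtain ⟨a', b', ha', _, _⟩ := h i (List.mem_cons_self ..)
      rw [hA] at ha'; exact absurd ha' (by simp)
    · show ("NO" : String) = "YES" ↔ _
      refine iff_of_false (by decide) (fun h => ?_)
      obtain ⟨a', b', _, hb', _⟩ := h i (List.mem_cons_self ..)
      rw [hB] at hb'; exact absurd hb' (by simp)
    · show (if a ≠ b then "NO" else solveAltScan la lb rest) = "YES" ↔ _
      by_cases hab : a = b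
      · rw [if_neg (by simp [hab]), ih]
        constructor
        · intro h x hx
          rcases List.mem_cons.mp hx with rfl | hx
          · exact ⟨a, b, hA, hB, hab⟩
          · exact h x hx
        · intro h x hx; exact h x (List.mem_cons_of_mem _ hx)
      · rw [if_pos hab]
        refine iff_of_false (by decide) (fun h => ?_)
        obtain ⟨a', b', ha', hb', he⟩ := h i (List.mem_cons_self ..)
        rw [hA] at ha'; rw [hB] at hb'
        obtain rfl : a = a' := Option.some_inj.mp ha'
        obtain rfl : b = b' := Option.some_inj.mp hb'
        exact hab he

theorem solveAltScan_eq_no (la lb : List Char) (is : List Int)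
    (h : solveAltScan la lb is ≠ "YES") : solveAltScan la lb is = "NO" := by
  induction is with
  | nil => exact absurd rfl h
  | cons i rest ih =>
    rcases hA : PySem.List.pyGet? la i with _ | a <;>
      rcases hB : PySem.List.pyGet? lb i with _ | b <;>
      rw [solveAltScan, hA, hB] at h ⊢
    case some.some =>
      show (if a ≠ b then "NO" else solveAltScan la lb rest) = "NO"
      replace h : (if a ≠ b then "NO" else solveAltScan la lb rest) ≠ "YES" := h
      by_cases hab : a ≠ b
      · rw [if_pos hab]
      · rw [if_neg hab] at h ⊢
        exact ih h

theorem pvGetD_replicate (j : Nat) (h : j < 26) :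
    PySem.List.pyGetD (List.replicate 26 (0 : Int)) (j : Int) 0 = 0 := by
  rw [PySem.List.pyGetD_eq_getElem _ _ (by omega) (by simpa using h)]
  exact List.getElem_replicate ..

-- the final all-zero test of A holds iff the per-slot counts of the two sides agree
theorem pvCount_bridge (zs : List (Char × Char)) (hlow : ∀ p ∈ zs, pvOk p.1 ∧ pvOk p.2) :
    ((zs.foldl pvStep (List.replicate 26 0)).all (fun c => c == 0) = true) ↔
      ∀ j, j < 26 → zs.countP (fun p => pvSlot p.1 == j) = zs.countP (fun p => pvSlot p.2 == j) := by
  have hlen : (zs.foldl pvStep (List.replicate 26 0)).length = 26 := by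
    rw [length_foldl_pvStep]; simp
  have hget : ∀ (j : Nat) (hj : j < 26), (zs.foldl pvStep (List.replicate 26 0))[j]'(by omega) =
      (zs.countP (fun p => pvSlot p.1 == j) : Int) - (zs.countP (fun p => pvSlot p.2 == j) : Int) := by
    intro j hj
    have h1 := foldl_pvStep_pyGetD zs j hj (List.replicate 26 0) (by simp) hlow
    rw [pvGetD_replicate j hj,
        PySem.List.pyGetD_eq_getElem _ _ (by omega) (by rw [hlen]; exact_mod_cast hj)] at h1
    simpa using h1
  constructor
  · intro hall j hj
    have hz := List.all_eq_true.mp hall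
      ((zs.foldl pvStep (List.replicate 26 0))[j]'(by omega)) (List.getElem_mem _)
    rw [beq_iff_eq, hget j hj] at hz
    omega
  · intro h
    rw [List.all_eq_true]
    intro x hx
    obtain ⟨j, hj, rfl⟩ := List.mem_iff_getElem.mp hx
    have hj26 : j < 26 := by omega
    rw [beq_iff_eq, hget j hj26, h j hj26]
    ring

-- characterization of A's output under Pre_: "YES" iff no locked mismatch and slot counts agree
theorem solve_yes_iff (N K : Int) (A B : String)
    (hlow : ∀ p ∈ A.toList.zip B.toList, pvOk p.1 ∧ pvOk p.2) :
    solve N K A B = "YES" ↔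
      (¬ ∃ j : Nat, ∃ h : j < (A.toList.zip B.toList).length,
          (j : Int) < K ∧ N - K - 1 < (j : Int) ∧
            (A.toList.zip B.toList)[j].1 ≠ (A.toList.zip B.toList)[j].2) ∧
      (∀ j, j < 26 →
          (A.toList.zip B.toList).countP (fun p => pvSlot p.1 == j) =
          (A.toList.zip B.toList).countP (fun p => pvSlot p.2 == j)) := by
  have hnone := solveLoop_none_iff N K (A.toList.zip B.toList) 0 (List.replicate 26 0)
  simp only [zero_add] at hnone
  rcases solveLoop_some N K (A.toList.zip B.toList) 0 (List.replicate 26 0) with hn | hs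
  · rw [solve, hn]
    exact iff_of_false (by decide) (fun h => h.1 (hnone.mp hn))
  · rw [solve, hs]
    show (if (((A.toList.zip B.toList).foldl pvStep (List.replicate 26 0)).all fun c => c == 0) = true
        then "YES" else "NO") = "YES" ↔ _
    have hnp : ¬ ∃ j : Nat, ∃ h : j < (A.toList.zip B.toList).length,
        (j : Int) < K ∧ N - K - 1 < (j : Int) ∧
          (A.toList.zip B.toList)[j].1 ≠ (A.toList.zip B.toList)[j].2 := by
      rw [← hnone]
      intro hh
      rw [hh] at hs
      cases hs
    split_ifs with hall
    · exact iff_of_true rfl ⟨hnp, (pvCount_bridge _ hlow).mp hall⟩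
    · refine iff_of_false (by decide) (fun h => ?_)
      exact hall ((pvCount_bridge _ hlow).mpr h.2)

theorem solve_eq_no (N K : Int) (A B : String) (h : solve N K A B ≠ "YES") :
    solve N K A B = "NO" := by
  cases hres : solveLoop N K (A.toList.zip B.toList) 0 (List.replicate 26 0) with
  | none => rw [solve, hres]
  | some cnt =>
    rw [solve, hres] at h ⊢
    replace h : (if (cnt.all fun c => c == 0) = true then "YES" else "NO") ≠ "YES" := h
    show (if (cnt.all fun c => c == 0) = true then "YES" else "NO") = "NO"
    by_cases hall : (cnt.all fun c => c == 0) = true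
    · rw [if_pos hall] at h; exact absurd rfl h
    · rw [if_neg hall]

-- characterization of B's output: "YES" iff the prefixes are anagrams and no locked mismatch
theorem solve_alt_yes_iff (N K : Int) (A B : String) :
    solve_alt N K A B = "YES" ↔
      (A.toList.take (min A.toList.length B.toList.length)).Perm
        (B.toList.take (min A.toList.length B.toList.length)) ∧
      (¬ ∃ j : Nat, ∃ h : j < (A.toList.zip B.toList).length,
          (j : Int) < K ∧ N - K - 1 < (j : Int) ∧
            (A.toList.zip B.toList)[j].1 ≠ (A.toList.zip B.toList)[j].2) := by
  have hzlen : (A.toList.zip B.toList).length = min A.toList.length B.toList.length :=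
    List.length_zip
  have hmle_a : min A.toList.length B.toList.length ≤ A.toList.length := Nat.min_le_left ..
  have hmle_b : min A.toList.length B.toList.length ≤ B.toList.length := Nat.min_le_right ..
  rw [solve_alt]
  simp only [PySem.List.slice_to_natCast]
  split_ifs with hsort
  · rw [ne_eq, PySem.List.sorted_id_eq_sorted_id_iff_perm] at hsort
    exact iff_of_false (by decide) (fun h => hsort h.1)
  · rw [ne_eq, not_not, PySem.List.sorted_id_eq_sorted_id_iff_perm] at hsort
    rw [solveAltScan_yes_iff]
    constructor
    · intro h
      refine ⟨hsort, fun hex => ?_⟩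
      obtain ⟨j, hj, h1, h2, h3⟩ := hex
      have hja : j < A.toList.length := by omega
      have hjb : j < B.toList.length := by omega
      obtain ⟨a', b', ha', hb', he⟩ := h (j : Int) (by
        rw [PySem.List.mem_pyRange_one]
        constructor
        · rw [max_le_iff]; omega
        · rw [lt_min_iff]; exact ⟨by omega, h1⟩)
      rw [PySem.List.pyGet?_eq_some_getElem _ (by omega) (by exact_mod_cast hja)] at ha'
      rw [PySem.List.pyGet?_eq_some_getElem _ (by omega) (by exact_mod_cast hjb)] at hb'
      apply h3
      rw [List.getElem_zip]
      obtain rfl : _ = a' := Option.some_inj.mp ha'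
      obtain rfl : _ = b' := Option.some_inj.mp hb'
      simpa using he
    · rintro ⟨-, hnp⟩ i hi
      rw [PySem.List.mem_pyRange_one, max_le_iff, lt_min_iff] at hi
      obtain ⟨⟨hi0, hiNK⟩, him, hiK⟩ := hi
      have hja : i.toNat < A.toList.length := by omega
      have hjb : i.toNat < B.toList.length := by omega
      refine ⟨A.toList[i.toNat], B.toList[i.toNat],
        PySem.List.pyGet?_eq_some_getElem _ hi0 (by omega),
        PySem.List.pyGet?_eq_some_getElem _ hi0 (by omega), ?_⟩
      by_contra hne
      apply hnp
      refine ⟨i.toNat, by rw [hzlen]; omega, by omega, by omega, ?_⟩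
      rw [List.getElem_zip]
      simpa using hne

theorem solve_alt_eq_no (N K : Int) (A B : String) (h : solve_alt N K A B ≠ "YES") :
    solve_alt N K A B = "NO" := by
  rw [solve_alt] at h ⊢
  split_ifs with hsort
  · rfl
  · rw [if_neg hsort] at h
    exact solveAltScan_eq_no _ _ _ h

-- the zipped per-slot counts are the per-slot counts of the two prefixes
theorem pvCountP_zip_fst (A B : String) (p : Char → Bool) :
    (A.toList.zip B.toList).countP (fun q => p q.1) =
      (A.toList.take (min A.toList.length B.toList.length)).countP p := by
  have hmapf : (A.toList.zip B.toList).map Prod.fst =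
      A.toList.take (min A.toList.length B.toList.length) := by
    rw [List.zip_eq_zip_take_min, List.map_fst_zip]; simp
  rw [← hmapf, List.countP_map]; rfl

theorem pvCountP_zip_snd (A B : String) (p : Char → Bool) :
    (A.toList.zip B.toList).countP (fun q => p q.2) =
      (B.toList.take (min A.toList.length B.toList.length)).countP p := by
  have hmaps : (A.toList.zip B.toList).map Prod.snd =
      B.toList.take (min A.toList.length B.toList.length) := by
    rw [List.zip_eq_zip_take_min, List.map_snd_zip]; simp
  rw [← hmaps, List.countP_map]; rfl

-- D_'s first conjunct (equality of the locked blocks) in pointwise form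
theorem pvBlock_iff (N K : Int) (A B : String) :
    (((A.toList.take (min A.toList.length B.toList.length)).take K.toNat).drop (N - K).toNat =
      ((B.toList.take (min A.toList.length B.toList.length)).take K.toNat).drop (N - K).toNat) ↔
    (∀ j : Nat, j < min A.toList.length B.toList.length →
        (j : Int) < K → N - K - 1 < (j : Int) → A.toList.getD j ' ' = B.toList.getD j ' ') := by
  rw [List.take_take, List.take_take, Nat.min_comm K.toNat]
  constructor
  · intro he j hj hK hNK
    have hja : j < A.toList.length := by omega
    have hjb : j < B.toList.length := by omega
    have hlo : (N - K).toNat ≤ j := by omega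
    have hhi : j < min (min A.toList.length B.toList.length) K.toNat := by omega
    have h3 := congrArg (fun l => l[j - (N - K).toNat]?) he
    simp only [List.getElem?_drop, List.getElem?_take] at h3
    rw [show (N - K).toNat + (j - (N - K).toNat) = j from by omega] at h3
    rw [if_pos hhi, if_pos hhi, List.getElem?_eq_getElem (l := A.toList) (by omega),
        List.getElem?_eq_getElem (l := B.toList) (by omega)] at h3
    rw [List.getD_eq_getElem _ _ hja, List.getD_eq_getElem _ _ hjb]
    exact Option.some_inj.mp h3
  · intro hp
    apply List.ext_getElem
    · simp only [List.length_drop, List.length_take]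
      omega
    · intro t h1 h2
      simp only [List.getElem_drop, List.getElem_take]
      have h1' : (N - K).toNat + t < min (min A.toList.length B.toList.length) K.toNat := by
        simp only [List.length_drop, List.length_take] at h1
        omega
      have := hp ((N - K).toNat + t) (by omega) (by omega) (by omega)
      rwa [List.getD_eq_getElem _ _ (by omega), List.getD_eq_getElem _ _ (by omega)] at this

-- D_'s second conjunct (anagrams after slot projection) as per-slot count equality
theorem pvSlotPerm_iff (pa pb : List Char) :
    (pa.map pvSlot).Perm (pb.map pvSlot) ↔
      ∀ j, j < 26 → pa.countP (fun c => pvSlot c == j) = pb.countP (fun c => pvSlot c == j) := by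
  constructor
  · intro hp j _
    have := hp.countP_eq (fun n => n == j)
    rwa [List.countP_map, List.countP_map] at this
  · intro h
    rw [List.perm_iff_count]
    intro n
    by_cases hn : n < 26
    · rw [List.count_eq_countP, List.count_eq_countP, List.countP_map, List.countP_map]
      exact h n hn
    · rw [List.count_eq_zero.mpr, List.count_eq_zero.mpr] <;>
        · intro hmem
          obtain ⟨c, -, rfl⟩ := List.mem_map.mp hmem
          exact hn (pvSlot_lt c)

-- the locked-mismatch condition of D_'s first conjunct is the negation of A's early return
theorem pvD1_iff (N K : Int) (A B : String) :
    (∀ j : Nat, j < min A.toList.length B.toList.length →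
        (j : Int) < K → N - K - 1 < (j : Int) → A.toList.getD j ' ' = B.toList.getD j ' ') ↔
      ¬ ∃ j : Nat, ∃ h : j < (A.toList.zip B.toList).length,
          (j : Int) < K ∧ N - K - 1 < (j : Int) ∧
            (A.toList.zip B.toList)[j].1 ≠ (A.toList.zip B.toList)[j].2 := by
  have hzlen : (A.toList.zip B.toList).length = min A.toList.length B.toList.length :=
    List.length_zip
  constructor
  · rintro h ⟨j, hj, h1, h2, h3⟩
    have hja : j < A.toList.length := by omega
    have hjb : j < B.toList.length := by omega
    apply h3
    rw [List.getElem_zip]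
    have := h j (by omega) h1 h2
    rwa [List.getD_eq_getElem _ _ hja, List.getD_eq_getElem _ _ hjb] at this
  · intro h j hj h1 h2
    have hja : j < A.toList.length := by omega
    have hjb : j < B.toList.length := by omega
    rw [List.getD_eq_getElem _ _ hja, List.getD_eq_getElem _ _ hjb]
    by_contra hne
    exact h ⟨j, by omega, h1, h2, by rw [List.getElem_zip]; simpa using hne⟩

theorem pvOk_zip (A B : String) (hpre : Pre_solve 0 0 A B) :
    ∀ p ∈ A.toList.zip B.toList, pvOk p.1 ∧ pvOk p.2 := by
  have hall := pvOk_of_all _ hpre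
  rintro ⟨x, y⟩ hp
  rw [List.zip_eq_zip_take_min] at hp
  exact ⟨hall x (List.mem_append_left _ (List.of_mem_zip hp).1),
         hall y (List.mem_append_right _ (List.of_mem_zip hp).2)⟩

-- ===== VERDICT (by name: the statement is the Claim_ definition above) =====
theorem solve_spec : Claim_unchanged_solve := by
  intro N K A B _hdom hpre hnd
  show solve N K A B = solve_alt N K A B
  have hlow := pvOk_zip A B hpre
  have hAiff := solve_yes_iff N K A B hlow
  have hBiff := solve_alt_yes_iff N K A B
  have hQM : (A.toList.take (min A.toList.length B.toList.length)).Perm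
        (B.toList.take (min A.toList.length B.toList.length)) →
      ∀ j, j < 26 →
        (A.toList.zip B.toList).countP (fun p => pvSlot p.1 == j) =
        (A.toList.zip B.toList).countP (fun p => pvSlot p.2 == j) := by
    intro hq j _
    rw [pvCountP_zip_fst A B (fun c => pvSlot c == j), pvCountP_zip_snd A B (fun c => pvSlot c == j)]
    exact hq.countP_eq _
  by_cases hB : solve_alt N K A B = "YES"
  · obtain ⟨hq, hnp⟩ := hBiff.mp hB
    rw [hB, hAiff.mpr ⟨hnp, hQM hq⟩]
  · rw [solve_alt_eq_no N K A B hB]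
    apply solve_eq_no
    intro hA
    obtain ⟨hnp, hm⟩ := hAiff.mp hA
    apply hB
    rw [hBiff]
    refine ⟨?_, hnp⟩
    by_contra hq
    exact hnd ⟨(pvBlock_iff N K A B).mpr ((pvD1_iff N K A B).mpr hnp),
      (pvSlotPerm_iff _ _).mpr (fun j hj => by
        have := hm j hj
        rwa [pvCountP_zip_fst A B (fun c => pvSlot c == j),
             pvCountP_zip_snd A B (fun c => pvSlot c == j)] at this),
      hq⟩

theorem solve_changed : Claim_changed_solve := by
  unfold Claim_changed_solve; decide

theorem solve_tight : Claim_exact_solve := by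
  intro N K A B _hdom hpre hd
  obtain ⟨hd1, hd2, hd3⟩ := hd
  have hlow := pvOk_zip A B hpre
  have hAyes : solve N K A B = "YES" := by
    rw [solve_yes_iff N K A B hlow]
    refine ⟨(pvD1_iff N K A B).mp ((pvBlock_iff N K A B).mp hd1), fun j hj => ?_⟩
    rw [pvCountP_zip_fst A B (fun c => pvSlot c == j),
        pvCountP_zip_snd A B (fun c => pvSlot c == j)]
    exact (pvSlotPerm_iff _ _).mp hd2 j hj
  have hBno : solve_alt N K A B = "NO" := by
    apply solve_alt_eq_no
    intro hB
    exact hd3 ((solve_alt_yes_iff N K A B).mp hB).1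
  rw [hAyes, hBno]
  decide
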